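-- pv_equiv track=rewrite | github.com/denix372/proiectarea-algoritmilor | dp/phase1-warmup-1d/brainpower.py | mostPoints
-- ===== SOURCE A (Python) =====
-- from typing import List
--
-- def mostPoints(questions: List[List[int]]) -> int:
--     n = len(questions)
--     dp = [0] * n
--
--     dp[n - 1] = questions[n - 1][0]
--
--     for i in range(n - 2, -1, -1):
--         p, b = questions[i]
--         if i + b  + 1 <= n - 1:
--             dp[i] = max(p + dp[i + b + 1], dp[i + 1])
--         else:
--             dp[i] = max(p, dp[i + 1])
--
--     return dp[0]
--
-- questions = [[1,1],[2,2],[3,3],[4,4],[5,5]]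
-- ===== SOURCE B (Python) =====
-- def mostPoints(questions):
--     # Top-down, demand-driven evaluation of the same recurrence: an explicit
--     # work stack with a memo dict, instead of filling a dp array right-to-left.
--     n = len(questions)
--     memo = {n - 1: questions[n - 1][0]}
--     stack = [0]
--     while stack:
--         i = stack[-1]
--         if i in memo:
--             stack.pop()
--             continue
--         p, b = questions[i]
--         j = i + b + 1
--         need = [d for d in (i + 1, j) if d <= n - 1 and d not in memo]
--         if need:
--             stack += need
--         else:
--             take = p + memo[j] if j <= n - 1 else p
--             memo[i] = max(take, memo[i + 1])
--     return memo[0]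
-- ===== Notes on version B (the rewrite author's own statement) =====
-- stated objective: alternative
-- what changed: B evaluates the recurrence top-down on demand with an explicit work stack and a memo dict (iterative DFS from index 0), instead of A's bottom-up right-to-left fill of a preallocated dp array.
-- outside the precondition, e.g. on mostPoints([[1, -1], [2, 2]]): A returns 2, B does not finish within the time limit
import Mathlib
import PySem

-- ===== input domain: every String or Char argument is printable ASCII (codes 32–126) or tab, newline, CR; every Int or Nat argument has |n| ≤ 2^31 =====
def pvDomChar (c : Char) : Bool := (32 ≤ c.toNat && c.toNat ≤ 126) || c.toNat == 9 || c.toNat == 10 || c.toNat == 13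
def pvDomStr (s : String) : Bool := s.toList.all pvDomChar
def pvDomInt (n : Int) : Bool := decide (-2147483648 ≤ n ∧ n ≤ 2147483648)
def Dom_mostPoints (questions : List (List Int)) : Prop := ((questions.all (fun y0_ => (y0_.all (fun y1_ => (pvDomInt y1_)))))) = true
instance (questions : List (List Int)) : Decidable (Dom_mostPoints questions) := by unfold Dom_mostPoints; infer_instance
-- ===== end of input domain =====

-- B evaluates the same recurrence top-down on demand (iterative DFS: explicit work stack +
-- memo dict) instead of A's bottom-up right-to-left fill of a preallocated dp array
-- (objective: alternative; same O(n) cost).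

-- ===== PORT A =====
def mostPoints (questions : List (List Int)) : Int :=
  let n : Int := questions.length
  let dp : List Int := List.replicate questions.length (0 : Int)
  let dp := PySem.List.pySetD dp (n - 1)
      (PySem.List.pyGetD (PySem.List.pyGetD questions (n - 1) []) 0 0)
  let dp := (PySem.List.pyRange (n - 2) (-1) (-1)).foldl (fun dp i =>
      if i + PySem.List.pyGetD (PySem.List.pyGetD questions i []) 1 0 + 1 ≤ n - 1 then
        PySem.List.pySetD dp i
          (max (PySem.List.pyGetD (PySem.List.pyGetD questions i []) 0 0
                  + PySem.List.pyGetD dp (i + PySem.List.pyGetD (PySem.List.pyGetD questions i []) 1 0 + 1) 0)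
               (PySem.List.pyGetD dp (i + 1) 0))
      else
        PySem.List.pySetD dp i
          (max (PySem.List.pyGetD (PySem.List.pyGetD questions i []) 0 0)
               (PySem.List.pyGetD dp (i + 1) 0))) dp
  PySem.List.pyGetD dp 0 0

-- ===== PORT B =====
-- the while loop of Source B; fuel is only a totality guard (the proof shows 5n+5 suffices)
def loopB (qs : List (List Int)) (n : Int) :
    Nat → PySem.Dict Int Int → List Int → PySem.Dict Int Int
  | 0, memo, _ => memo
  | _ + 1, memo, [] => memo
  | f + 1, memo, i :: rest =>
    if (PySem.Dict.get? memo i).isSome then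
      loopB qs n f memo rest
    else
      let p := PySem.List.pyGetD (PySem.List.pyGetD qs i []) 0 0
      let b := PySem.List.pyGetD (PySem.List.pyGetD qs i []) 1 0
      let j := i + b + 1
      let need := (if i + 1 ≤ n - 1 ∧ (PySem.Dict.get? memo (i + 1)).isNone then [i + 1] else [])
               ++ (if j ≤ n - 1 ∧ (PySem.Dict.get? memo j).isNone then [j] else [])
      if need = [] then
        let take := if j ≤ n - 1 then p + PySem.Dict.getD memo j 0 else p
        loopB qs n f (PySem.Dict.insert memo i (max take (PySem.Dict.getD memo (i + 1) 0))) rest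
      else
        loopB qs n f memo (need.reverse ++ i :: rest)

def mostPoints_alt (questions : List (List Int)) : Int :=
  let n : Int := questions.length
  let memo : PySem.Dict Int Int :=
    PySem.Dict.insert PySem.Dict.empty (n - 1)
      (PySem.List.pyGetD (PySem.List.pyGetD questions (n - 1) []) 0 0)
  let memo := loopB questions n (5 * questions.length + 5) memo [0]
  PySem.Dict.getD memo 0 0

-- ===== PRECONDITION & SPEC =====
-- Pre_ excludes: the empty list and rows A cannot unpack into 'p, b' (A raises
-- IndexError/ValueError there), and non-last rows with a negative skip count b < 0 —
-- outside the problem's natural domain — where A's value comes from stale dp zeros or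
-- negative-index wraparound (A also raises IndexError for very negative b) while B's
-- demand-driven evaluation chases the backward jump in a cycle and does not terminate.
def Pre_mostPoints (questions : List (List Int)) : Prop :=
  questions ≠ [] ∧
  (∀ i ∈ List.range (questions.length - 1),
      (questions.getD i []).length = 2 ∧ 0 ≤ (questions.getD i []).getD 1 0) ∧
  1 ≤ (questions.getD (questions.length - 1) []).length

instance (questions : List (List Int)) : Decidable (Pre_mostPoints questions) := by
  unfold Pre_mostPoints; infer_instance

def pvWitness_mostPoints : List (List Int) := [[1, 1], [2, 2], [3, 3], [4, 4], [5, 5]]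

def Spec_mostPoints (questions : List (List Int)) (out : Int) : Prop := out = mostPoints_alt questions
instance (questions : List (List Int)) (out : Int) : Decidable (Spec_mostPoints questions out) := by
  unfold Spec_mostPoints; infer_instance

-- ===== CLAIM (what is proved, stated in full; the proofs are below) =====
def Claim_equal_mostPoints : Prop := ∀ (questions : List (List Int)), Dom_mostPoints questions → Pre_mostPoints questions → Spec_mostPoints questions (mostPoints questions)

-- ===== LEMMAS AND PROOFS =====

-- the common value both programs compute: bestFrom qs k = the recurrence's value for
-- index qs.length - k (k = number of remaining questions)
def bestFrom (qs : List (List Int)) : Nat → Int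
  | 0 => 0
  | 1 => (qs.getD (qs.length - 1) []).getD 0 0
  | k + 2 =>
    if ((qs.length - (k + 2) : Nat) : Int) + (qs.getD (qs.length - (k + 2)) []).getD 1 0 + 1
        ≤ (qs.length : Int) - 1 then
      max ((qs.getD (qs.length - (k + 2)) []).getD 0 0
             + bestFrom qs (k + 1 - ((qs.getD (qs.length - (k + 2)) []).getD 1 0).toNat))
          (bestFrom qs (k + 1))
    else
      max ((qs.getD (qs.length - (k + 2)) []).getD 0 0) (bestFrom qs (k + 1))

-- row accessors and the rows hypothesis extracted from Pre_
def bOf (qs : List (List Int)) (t : Nat) : Int := (qs.getD t []).getD 1 0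
def jOf (qs : List (List Int)) (t : Nat) : Nat := t + 1 + (bOf qs t).toNat
def Rows (qs : List (List Int)) : Prop :=
  ∀ t : Nat, t < qs.length - 1 → (qs.getD t []).length = 2 ∧ 0 ≤ bOf qs t

-- number of not-yet-memoized indices
def U (n : Nat) (memo : PySem.Dict Int Int) : Nat :=
  ((List.range n).filter (fun t => (PySem.Dict.get? memo ((t : Nat) : Int)).isNone)).length

-- the memo invariant: every entry is a correct value of the recurrence, and the seed
-- entry for the last index is present
def InvB (qs : List (List Int)) (memo : PySem.Dict Int Int) : Prop :=
  (PySem.Dict.get? memo ((qs.length : Int) - 1)).isSome ∧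
  ∀ k v, PySem.Dict.get? memo k = some v →
    ∃ t : Nat, k = (t : Int) ∧ t < qs.length ∧ v = bestFrom qs (qs.length - t)

-- ---- small facts ----

theorem loopB_nil (qs : List (List Int)) (n : Int) (f : Nat) (memo : PySem.Dict Int Int) :
    loopB qs n f memo [] = memo := by cases f <;> rfl

theorem loopB_cons (qs : List (List Int)) (n : Int) (f : Nat) (memo : PySem.Dict Int Int)
    (i : Int) (rest : List Int) :
    loopB qs n (f + 1) memo (i :: rest) =
      if (PySem.Dict.get? memo i).isSome then
        loopB qs n f memo rest
      else
        let p := PySem.List.pyGetD (PySem.List.pyGetD qs i []) 0 0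
        let b := PySem.List.pyGetD (PySem.List.pyGetD qs i []) 1 0
        let j := i + b + 1
        let need := (if i + 1 ≤ n - 1 ∧ (PySem.Dict.get? memo (i + 1)).isNone then [i + 1] else [])
                 ++ (if j ≤ n - 1 ∧ (PySem.Dict.get? memo j).isNone then [j] else [])
        if need = [] then
          let take := if j ≤ n - 1 then p + PySem.Dict.getD memo j 0 else p
          loopB qs n f (PySem.Dict.insert memo i (max take (PySem.Dict.getD memo (i + 1) 0))) rest
        else
          loopB qs n f memo (need.reverse ++ i :: rest) := rfl

theorem pyRow (qs : List (List Int)) (t : Nat) :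
    PySem.List.pyGetD qs ((t : Nat) : Int) [] = qs.getD t [] := by
  simp [PySem.List.pyGetD_natCast]

theorem pyP (qs : List (List Int)) (t : Nat) :
    PySem.List.pyGetD (PySem.List.pyGetD qs ((t : Nat) : Int) []) 0 0 = (qs.getD t []).getD 0 0 := by
  rw [pyRow, show (0 : Int) = ((0 : Nat) : Int) from rfl, PySem.List.pyGetD_natCast]

theorem pyB (qs : List (List Int)) (t : Nat) :
    PySem.List.pyGetD (PySem.List.pyGetD qs ((t : Nat) : Int) []) 1 0 = bOf qs t := by
  rw [pyRow, show (1 : Int) = ((1 : Nat) : Int) from rfl, PySem.List.pyGetD_natCast]; rfl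

theorem mono_isSome {memo memo' : PySem.Dict Int Int}
    (h : ∀ k v, PySem.Dict.get? memo k = some v → PySem.Dict.get? memo' k = some v)
    {k : Int} (hk : (PySem.Dict.get? memo k).isSome) : (PySem.Dict.get? memo' k).isSome := by
  obtain ⟨v, hv⟩ := Option.isSome_iff_exists.mp hk
  rw [h k v hv]; rfl

theorem U_le (n : Nat) (memo : PySem.Dict Int Int) : U n memo ≤ n := by
  unfold U
  calc _ ≤ (List.range n).length := List.length_filter_le _ _
    _ = n := List.length_range ..

-- helper: filter length is monotone in the predicate
theorem filterLen_mono {p q : Nat → Bool} (h : ∀ t, p t = true → q t = true) :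
    ∀ l : List Nat, (l.filter p).length ≤ (l.filter q).length := by
  intro l
  induction l with
  | nil => simp
  | cons a l ih =>
    by_cases ha : p a = true
    · rw [List.filter_cons, if_pos ha, List.filter_cons, if_pos (h a ha)]
      simpa using ih
    · rw [List.filter_cons, if_neg ha]
      by_cases hqa : q a = true
      · rw [List.filter_cons, if_pos hqa]
        exact ih.trans (by simp)
      · rw [List.filter_cons, if_neg hqa]
        exact ih

theorem U_mono (n : Nat) (memo memo' : PySem.Dict Int Int)
    (h : ∀ k v, PySem.Dict.get? memo k = some v → PySem.Dict.get? memo' k = some v) :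
    U n memo' ≤ U n memo := by
  unfold U
  refine filterLen_mono (fun t ht => ?_) (List.range n)
  cases hm : PySem.Dict.get? memo ((t : Nat) : Int) with
  | none => simp
  | some v => rw [h _ _ hm] at ht; simp at ht

-- helper: removing one satisfied element from a Nodup list's filter
theorem filterLen_remove (p : Nat → Bool) (t0 : Nat) (hp : p t0 = true) :
    ∀ l : List Nat, l.Nodup → t0 ∈ l →
      (l.filter (fun t => !decide (t = t0) && p t)).length + 1 = (l.filter p).length := by
  intro l
  induction l with
  | nil => intro _ h; cases h
  | cons a l ih =>
    intro hnd hmem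
    rcases List.mem_cons.mp hmem with rfl | hmem'
    · have hnotin : t0 ∉ l := (List.nodup_cons.mp hnd).1
      have hcong : l.filter (fun t => !decide (t = t0) && p t) = l.filter p := by
        refine List.filter_congr (fun x hx => ?_)
        have hxne : x ≠ t0 := fun h => hnotin (h ▸ hx)
        simp [hxne]
      rw [List.filter_cons, if_neg (by simp), List.filter_cons, if_pos hp, hcong]
      simp
    · have hnd' := (List.nodup_cons.mp hnd).2
      by_cases hap : p a = true
      · by_cases hat : a = t0
        · subst hat
          exact absurd hmem' (List.nodup_cons.mp hnd).1
        · rw [List.filter_cons, if_pos (by simp [hat, hap]), List.filter_cons, if_pos hap]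
          simpa using ih hnd' hmem'
      · rw [List.filter_cons, if_neg (by simp [hap]), List.filter_cons, if_neg hap]
        exact ih hnd' hmem'

theorem U_insert (n : Nat) (memo : PySem.Dict Int Int) (t0 : Nat) (v : Int)
    (ht : t0 < n) (h : PySem.Dict.get? memo ((t0 : Nat) : Int) = none) :
    U n (PySem.Dict.insert memo ((t0 : Nat) : Int) v) + 1 = U n memo := by
  unfold U
  have hcong : (List.range n).filter
        (fun t => (PySem.Dict.get? (PySem.Dict.insert memo ((t0 : Nat) : Int) v) ((t : Nat) : Int)).isNone)
      = (List.range n).filter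
        (fun t => !decide (t = t0) && (PySem.Dict.get? memo ((t : Nat) : Int)).isNone) := by
    refine List.filter_congr (fun x _ => ?_)
    rw [PySem.Dict.get?_insert]
    by_cases hx : x = t0
    · subst hx; simp
    · have hxi : ((x : Nat) : Int) ≠ ((t0 : Nat) : Int) := by exact_mod_cast hx
      simp [hxi, hx]
  rw [hcong]
  exact filterLen_remove _ t0 (by simp [h]) (List.range n) (List.nodup_range ..) (List.mem_range.mpr ht)

theorem U_pos (n : Nat) (memo : PySem.Dict Int Int) (t0 : Nat)
    (ht : t0 < n) (h : PySem.Dict.get? memo ((t0 : Nat) : Int) = none) :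
    1 ≤ U n memo := by
  have hmemf : t0 ∈ (List.range n).filter (fun t => (PySem.Dict.get? memo ((t : Nat) : Int)).isNone) :=
    List.mem_filter.mpr ⟨List.mem_range.mpr ht, by simp [h]⟩
  have := List.length_pos_of_mem hmemf
  unfold U; omega

-- unfolding bestFrom at an interior index
theorem bestFrom_interior (qs : List (List Int)) (i : Nat) (hi : i < qs.length - 1) :
    bestFrom qs (qs.length - i) =
      if ((i : Nat) : Int) + bOf qs i + 1 ≤ (qs.length : Int) - 1 then
        max ((qs.getD i []).getD 0 0 + bestFrom qs (qs.length - jOf qs i))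
            (bestFrom qs (qs.length - (i + 1)))
      else
        max ((qs.getD i []).getD 0 0) (bestFrom qs (qs.length - (i + 1))) := by
  obtain ⟨k0, hk⟩ : ∃ k0, qs.length - i = k0 + 2 := ⟨qs.length - i - 2, by omega⟩
  have h1 : qs.length - (k0 + 2) = i := by omega
  have h3 : k0 + 1 = qs.length - (i + 1) := by omega
  have h2 : qs.length - (i + 1) - ((qs.getD i []).getD 1 0).toNat = qs.length - jOf qs i := by
    unfold jOf bOf; omega
  rw [hk]
  simp only [bestFrom, h1, h3]
  rw [h2]
  rfl

theorem InvB_insert (qs : List (List Int)) (memo : PySem.Dict Int Int) (i : Nat)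
    (hInv : InvB qs memo) (hi : i < qs.length) :
    InvB qs (PySem.Dict.insert memo ((i : Nat) : Int) (bestFrom qs (qs.length - i))) := by
  constructor
  · rw [PySem.Dict.get?_insert]
    split
    · rfl
    · exact hInv.1
  · intro k v hkv
    rw [PySem.Dict.get?_insert] at hkv
    split at hkv
    · rename_i hki
      exact ⟨i, hki, hi, (Option.some_inj.mp hkv).symm⟩
    · exact hInv.2 k v hkv

theorem loopB_finalize (qs : List (List Int)) (f : Nat) (memo : PySem.Dict Int Int)
    (i : Nat) (rest : List Int) (hR : Rows qs) (hInv : InvB qs memo)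
    (hi : i < qs.length - 1)
    (hnone : PySem.Dict.get? memo ((i : Nat) : Int) = none)
    (hd1 : (PySem.Dict.get? memo (((i + 1 : Nat)) : Int)).isSome)
    (hd2 : ((jOf qs i : Nat) : Int) ≤ ((qs.length : Nat) : Int) - 1 →
      (PySem.Dict.get? memo ((jOf qs i : Nat) : Int)).isSome) :
    loopB qs (qs.length) (f + 1) memo (((i : Nat) : Int) :: rest) =
      loopB qs (qs.length) f
        (PySem.Dict.insert memo ((i : Nat) : Int) (bestFrom qs (qs.length - i))) rest := by
  obtain ⟨hrlen, hb⟩ := hR i hi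
  have hj : ((i : Nat) : Int) + PySem.List.pyGetD (PySem.List.pyGetD qs ((i : Nat) : Int) []) 1 0 + 1
      = ((jOf qs i : Nat) : Int) := by
    rw [pyB]; unfold jOf; push_cast [Int.toNat_of_nonneg hb]; ring
  have hcast1 : ((i : Nat) : Int) + 1 = ((i + 1 : Nat) : Int) := by push_cast; ring
  have hno1 : ¬ (((i + 1 : Nat) : Int) ≤ (qs.length : Int) - 1
      ∧ (PySem.Dict.get? memo (((i + 1 : Nat)) : Int)).isNone = true) := by
    rintro ⟨-, hno⟩
    rw [Option.isNone_iff_eq_none] at hno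
    rw [hno] at hd1; simp at hd1
  have hno2 : ¬ (((jOf qs i : Nat) : Int) ≤ (qs.length : Int) - 1
      ∧ (PySem.Dict.get? memo ((jOf qs i : Nat) : Int)).isNone = true) := by
    rintro ⟨hle, hno⟩
    rw [Option.isNone_iff_eq_none] at hno
    have := hd2 hle
    rw [hno] at this; simp at this
  rw [loopB_cons, if_neg (by simp [hnone])]
  simp only [hj, hcast1]
  rw [if_neg hno1, if_neg hno2, List.nil_append, if_pos rfl]
  congr 1
  -- the inserted value is bestFrom qs (qs.length - i)
  rw [bestFrom_interior qs i hi]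
  have hguard : (((i : Nat) : Int) + bOf qs i + 1 ≤ (qs.length : Int) - 1)
      ↔ (((jOf qs i : Nat) : Int) ≤ (qs.length : Int) - 1) := by
    unfold jOf
    push_cast [Int.toNat_of_nonneg hb]
    omega
  by_cases hg : ((jOf qs i : Nat) : Int) ≤ (qs.length : Int) - 1
  · obtain ⟨vj, hvj⟩ := Option.isSome_iff_exists.mp (hd2 hg)
    obtain ⟨tj, htj, htjlt, htjval⟩ := hInv.2 _ _ hvj
    have htjeq : tj = jOf qs i := (by exact_mod_cast htj : jOf qs i = tj).symm
    subst htjeq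
    obtain ⟨v2, hv2⟩ := Option.isSome_iff_exists.mp hd1
    obtain ⟨t2, ht2, ht2lt, ht2val⟩ := hInv.2 _ _ hv2
    have ht2eq : t2 = i + 1 := (by exact_mod_cast ht2 : i + 1 = t2).symm
    subst ht2eq
    rw [if_pos hg, if_pos (hguard.mpr hg)]
    rw [PySem.Dict.getD_eq_get?_getD, hvj, PySem.Dict.getD_eq_get?_getD, hv2]
    rw [pyP, htjval, ht2val]
    rfl
  · obtain ⟨v2, hv2⟩ := Option.isSome_iff_exists.mp hd1
    obtain ⟨t2, ht2, ht2lt, ht2val⟩ := hInv.2 _ _ hv2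
    have ht2eq : t2 = i + 1 := (by exact_mod_cast ht2 : i + 1 = t2).symm
    subst ht2eq
    rw [if_neg hg, if_neg (fun h => hg (hguard.mp h))]
    rw [PySem.Dict.getD_eq_get?_getD, hv2, pyP, ht2val]
    rfl

-- ---- the main B-side lemma: solving the top of the stack ----

theorem solveB (qs : List (List Int)) (hR : Rows qs) :
    ∀ fuel : Nat, ∀ (memo : PySem.Dict Int Int) (i : Nat) (rest : List Int),
      InvB qs memo → i < qs.length →
      4 * U qs.length memo + (qs.length - i) ≤ fuel →
      ∃ (c : Nat) (memo' : PySem.Dict Int Int),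
        c ≤ fuel ∧
        loopB qs (qs.length) fuel memo (((i : Nat) : Int) :: rest)
          = loopB qs (qs.length) (fuel - c) memo' rest ∧
        InvB qs memo' ∧
        (∀ k v, PySem.Dict.get? memo k = some v → PySem.Dict.get? memo' k = some v) ∧
        (PySem.Dict.get? memo' ((i : Nat) : Int)).isSome ∧
        (∀ k, (PySem.Dict.get? memo' k).isSome →
          (PySem.Dict.get? memo k).isSome ∨ ∃ t : Nat, k = (t : Int) ∧ i ≤ t ∧ t < qs.length) ∧
        ((PySem.Dict.get? memo ((i : Nat) : Int)).isSome → c = 1 ∧ memo' = memo) ∧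
        ((PySem.Dict.get? memo ((i : Nat) : Int)) = none →
          c + 1 ≤ 4 * (U qs.length memo - U qs.length memo') ∧
          U qs.length memo' < U qs.length memo) := by
  intro fuel
  induction fuel using Nat.strong_induction_on with
  | _ fuel IH =>
  intro memo i rest hInv hi hfuel
  cases fuel with
  | zero => omega
  | succ f =>
  by_cases hmem : (PySem.Dict.get? memo ((i : Nat) : Int)).isSome
  · refine ⟨1, memo, by omega, ?_, hInv, fun k v h => h, hmem, fun k h => Or.inl h,
      fun _ => ⟨rfl, rfl⟩, fun hno => by rw [hno] at hmem; simp at hmem⟩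
    rw [loopB_cons, if_pos hmem]
    norm_num
  · have hnone : PySem.Dict.get? memo ((i : Nat) : Int) = none :=
      Option.not_isSome_iff_eq_none.mp hmem
    have hi1 : i < qs.length - 1 := by
      by_contra hcon
      have hieq : i = qs.length - 1 := by omega
      have hc : ((i : Nat) : Int) = (qs.length : Int) - 1 := by subst hieq; omega
      have hs := hInv.1
      rw [← hc, hnone] at hs; simp at hs
    obtain ⟨hrlen, hb⟩ := hR i hi1
    have hj : ((i : Nat) : Int) + PySem.List.pyGetD (PySem.List.pyGetD qs ((i : Nat) : Int) []) 1 0 + 1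
        = ((jOf qs i : Nat) : Int) := by
      rw [pyB]; unfold jOf; push_cast [Int.toNat_of_nonneg hb]; ring
    have hcast1 : ((i : Nat) : Int) + 1 = ((i + 1 : Nat) : Int) := by push_cast; ring
    have hiplt : i + 1 < qs.length := by omega
    have hjge : i + 1 ≤ jOf qs i := by unfold jOf; omega
    have hipleI : ((i + 1 : Nat) : Int) ≤ (qs.length : Int) - 1 := by omega
    have hUle := U_le qs.length memo
    by_cases hd1s : (PySem.Dict.get? memo ((i + 1 : Nat) : Int)).isSome
    · by_cases hjm : ((jOf qs i : Nat) : Int) ≤ (qs.length : Int) - 1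
          ∧ PySem.Dict.get? memo ((jOf qs i : Nat) : Int) = none
      · -- expand on j only
        obtain ⟨hjle, hjnone⟩ := hjm
        have hjlt : jOf qs i < qs.length := by omega
        have hstep : loopB qs (qs.length) (f + 1) memo (((i : Nat) : Int) :: rest)
            = loopB qs (qs.length) f memo
              (((jOf qs i : Nat) : Int) :: ((i : Nat) : Int) :: rest) := by
          have e1 : (if ((i + 1 : Nat) : Int) ≤ (qs.length : Int) - 1
                ∧ (PySem.Dict.get? memo ((i + 1 : Nat) : Int)).isNone = true
              then [((i + 1 : Nat) : Int)] else ([] : List Int)) = [] :=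
            if_neg (by rintro ⟨-, hno⟩; rw [Option.isNone_iff_eq_none] at hno; rw [hno] at hd1s; simp at hd1s)
          have e2 : (if ((jOf qs i : Nat) : Int) ≤ (qs.length : Int) - 1
                ∧ (PySem.Dict.get? memo ((jOf qs i : Nat) : Int)).isNone = true
              then [((jOf qs i : Nat) : Int)] else ([] : List Int)) = [((jOf qs i : Nat) : Int)] :=
            if_pos ⟨hjle, by rw [hjnone]; rfl⟩
          rw [loopB_cons, if_neg (show ¬((PySem.Dict.get? memo ((i : Nat) : Int)).isSome = true) by simp [hnone])]
          simp only [hj, hcast1]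
          rw [e1, e2]
          have hne : (([] : List Int) ++ [((jOf qs i : Nat) : Int)]) ≠ [] := by simp
          rw [if_neg hne]
          rfl
        obtain ⟨cj, memo1, hcjle, heq1, hInv1, hmono1, hjsome1, hnew1, -, hnonecl1⟩ :=
          IH f (by omega) memo (jOf qs i) (((i : Nat) : Int) :: rest) hInv hjlt (by omega)
        obtain ⟨hcj4, hU1lt⟩ := hnonecl1 hjnone
        have hU1le := U_mono qs.length memo memo1 hmono1
        have hinone1 : PySem.Dict.get? memo1 ((i : Nat) : Int) = none := by
          cases h1 : PySem.Dict.get? memo1 ((i : Nat) : Int) with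
          | none => rfl
          | some v =>
            rcases hnew1 _ (by rw [h1]; rfl) with hs | ⟨t, ht, hge, -⟩
            · rw [hnone] at hs; simp at hs
            · have : i = t := by exact_mod_cast ht
              omega
        have hUipos := U_pos qs.length memo1 i hi hinone1
        have hd1s1 : (PySem.Dict.get? memo1 ((i + 1 : Nat) : Int)).isSome := mono_isSome hmono1 hd1s
        have hf1 : 1 ≤ f - cj := by omega
        obtain ⟨f2, hf2⟩ : ∃ f2, f - cj = f2 + 1 := ⟨f - cj - 1, by omega⟩
        have hfin : loopB qs (qs.length) (f - cj) memo1 (((i : Nat) : Int) :: rest)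
            = loopB qs (qs.length) f2
              (PySem.Dict.insert memo1 ((i : Nat) : Int) (bestFrom qs (qs.length - i))) rest := by
          rw [hf2]
          exact loopB_finalize qs f2 memo1 i rest hR hInv1 hi1 hinone1 hd1s1 (fun _ => hjsome1)
        have hU2 := U_insert qs.length memo1 i (bestFrom qs (qs.length - i)) hi hinone1
        refine ⟨cj + 2, _, by omega, ?_, InvB_insert qs memo1 i hInv1 hi, ?_, ?_, ?_,
          fun h => by rw [hnone] at h; simp at h, fun _ => by omega⟩
        · rw [hstep, heq1, hfin]
          have harith : f + 1 - (cj + 2) = f2 := by omega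
          rw [harith]
        · intro k v hkv
          have h1 := hmono1 k v hkv
          rw [PySem.Dict.get?_insert]
          split
          · rename_i he; rw [he, hinone1] at h1; cases h1
          · exact h1
        · rw [PySem.Dict.get?_insert_self]; rfl
        · intro k hk
          rw [PySem.Dict.get?_insert] at hk
          split at hk
          · rename_i he; exact Or.inr ⟨i, he, le_refl i, hi⟩
          · rcases hnew1 k hk with hs | ⟨t, ht, hge, hlt⟩
            · exact Or.inl hs
            · exact Or.inr ⟨t, ht, by omega, hlt⟩
      · -- finalize immediately
        have hd2 : ((jOf qs i : Nat) : Int) ≤ (qs.length : Int) - 1 →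
            (PySem.Dict.get? memo ((jOf qs i : Nat) : Int)).isSome := by
          intro hle
          rcases h : PySem.Dict.get? memo ((jOf qs i : Nat) : Int) with _ | v
          · exact absurd ⟨hle, h⟩ hjm
          · rfl
        have hU2 := U_insert qs.length memo i (bestFrom qs (qs.length - i)) hi hnone
        have hU2pos := U_pos qs.length memo i hi hnone
        refine ⟨1, _, by omega, ?_, InvB_insert qs memo i hInv hi, ?_, ?_, ?_,
          fun h => by rw [hnone] at h; simp at h, fun _ => by omega⟩
        · have h1 : f + 1 - 1 = f := by omega
          rw [h1]
          exact loopB_finalize qs f memo i rest hR hInv hi1 hnone hd1s hd2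
        · intro k v hkv
          rw [PySem.Dict.get?_insert]
          split
          · rename_i he; rw [he, hnone] at hkv; cases hkv
          · exact hkv
        · rw [PySem.Dict.get?_insert_self]; rfl
        · intro k hk
          rw [PySem.Dict.get?_insert] at hk
          split at hk
          · rename_i he; exact Or.inr ⟨i, he, le_refl i, hi⟩
          · exact Or.inl hk
    · have hd1none : PySem.Dict.get? memo ((i + 1 : Nat) : Int) = none :=
        Option.not_isSome_iff_eq_none.mp hd1s
      by_cases hjm : ((jOf qs i : Nat) : Int) ≤ (qs.length : Int) - 1
          ∧ PySem.Dict.get? memo ((jOf qs i : Nat) : Int) = none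
      · -- expand on both i+1 and j
        obtain ⟨hjle, hjnone⟩ := hjm
        have hjlt : jOf qs i < qs.length := by omega
        have hstep : loopB qs (qs.length) (f + 1) memo (((i : Nat) : Int) :: rest)
            = loopB qs (qs.length) f memo
              (((jOf qs i : Nat) : Int) :: ((i + 1 : Nat) : Int) :: ((i : Nat) : Int) :: rest) := by
          have e1 : (if ((i + 1 : Nat) : Int) ≤ (qs.length : Int) - 1
                ∧ (PySem.Dict.get? memo ((i + 1 : Nat) : Int)).isNone = true
              then [((i + 1 : Nat) : Int)] else ([] : List Int)) = [((i + 1 : Nat) : Int)] :=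
            if_pos ⟨hipleI, by rw [hd1none]; rfl⟩
          have e2 : (if ((jOf qs i : Nat) : Int) ≤ (qs.length : Int) - 1
                ∧ (PySem.Dict.get? memo ((jOf qs i : Nat) : Int)).isNone = true
              then [((jOf qs i : Nat) : Int)] else ([] : List Int)) = [((jOf qs i : Nat) : Int)] :=
            if_pos ⟨hjle, by rw [hjnone]; rfl⟩
          rw [loopB_cons, if_neg (show ¬((PySem.Dict.get? memo ((i : Nat) : Int)).isSome = true) by simp [hnone])]
          simp only [hj, hcast1]
          rw [e1, e2]
          have hne : ([((i + 1 : Nat) : Int)] ++ [((jOf qs i : Nat) : Int)]) ≠ ([] : List Int) := by simp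
          rw [if_neg hne]
          rfl
        obtain ⟨cj, memo1, hcjle, heq1, hInv1, hmono1, hjsome1, hnew1, -, hnonecl1⟩ :=
          IH f (by omega) memo (jOf qs i)
            (((i + 1 : Nat) : Int) :: ((i : Nat) : Int) :: rest) hInv hjlt (by omega)
        obtain ⟨hcj4, hU1lt⟩ := hnonecl1 hjnone
        have hU1le := U_mono qs.length memo memo1 hmono1
        obtain ⟨c2, memo2, hc2le, heq2, hInv2, hmono2, hipsome2, hnew2, hsomecl2, hnonecl2⟩ :=
          IH (f - cj) (by omega) memo1 (i + 1) (((i : Nat) : Int) :: rest) hInv1 hiplt (by omega)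
        have hU2le := U_mono qs.length memo1 memo2 hmono2
        have hc2' : c2 ≤ 4 * (U qs.length memo1 - U qs.length memo2) + 1 := by
          by_cases hs : (PySem.Dict.get? memo1 ((i + 1 : Nat) : Int)).isSome
          · rcases hsomecl2 hs with ⟨hc, hmeq⟩; rw [hmeq]; omega
          · have := (hnonecl2 (Option.not_isSome_iff_eq_none.mp hs)).1; omega
        have hinone2 : PySem.Dict.get? memo2 ((i : Nat) : Int) = none := by
          cases h2 : PySem.Dict.get? memo2 ((i : Nat) : Int) with
          | none => rfl
          | some v =>
            rcases hnew2 _ (by rw [h2]; rfl) with hs1 | ⟨t, ht, hge, -⟩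
            · rcases hnew1 _ hs1 with hs0 | ⟨t, ht, hge, -⟩
              · rw [hnone] at hs0; simp at hs0
              · have : i = t := by exact_mod_cast ht
                omega
            · have : i = t := by exact_mod_cast ht
              omega
        have hUipos := U_pos qs.length memo2 i hi hinone2
        have hjsome2 : (PySem.Dict.get? memo2 ((jOf qs i : Nat) : Int)).isSome :=
          mono_isSome hmono2 hjsome1
        have hf2pos : 1 ≤ f - cj - c2 := by omega
        obtain ⟨f3, hf3⟩ : ∃ f3, f - cj - c2 = f3 + 1 := ⟨f - cj - c2 - 1, by omega⟩
        have hfin : loopB qs (qs.length) (f - cj - c2) memo2 (((i : Nat) : Int) :: rest)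
            = loopB qs (qs.length) f3
              (PySem.Dict.insert memo2 ((i : Nat) : Int) (bestFrom qs (qs.length - i))) rest := by
          rw [hf3]
          exact loopB_finalize qs f3 memo2 i rest hR hInv2 hi1 hinone2 hipsome2 (fun _ => hjsome2)
        have hU3 := U_insert qs.length memo2 i (bestFrom qs (qs.length - i)) hi hinone2
        refine ⟨cj + c2 + 2, _, by omega, ?_, InvB_insert qs memo2 i hInv2 hi, ?_, ?_, ?_,
          fun h => by rw [hnone] at h; simp at h, fun _ => by omega⟩
        · rw [hstep, heq1, heq2, hfin]
          have harith : f + 1 - (cj + c2 + 2) = f3 := by omega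
          rw [harith]
        · intro k v hkv
          have h2 := hmono2 k v (hmono1 k v hkv)
          rw [PySem.Dict.get?_insert]
          split
          · rename_i he; rw [he, hinone2] at h2; cases h2
          · exact h2
        · rw [PySem.Dict.get?_insert_self]; rfl
        · intro k hk
          rw [PySem.Dict.get?_insert] at hk
          split at hk
          · rename_i he; exact Or.inr ⟨i, he, le_refl i, hi⟩
          · rcases hnew2 k hk with hs1 | ⟨t, ht, hge, hlt⟩
            · rcases hnew1 k hs1 with hs0 | ⟨t2, ht2, hge2, hlt2⟩
              · exact Or.inl hs0
              · exact Or.inr ⟨t2, ht2, by omega, hlt2⟩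
            · exact Or.inr ⟨t, ht, by omega, hlt⟩
      · -- expand on i+1 only
        have hd2m : ((jOf qs i : Nat) : Int) ≤ (qs.length : Int) - 1 →
            (PySem.Dict.get? memo ((jOf qs i : Nat) : Int)).isSome := by
          intro hle
          rcases h : PySem.Dict.get? memo ((jOf qs i : Nat) : Int) with _ | v
          · exact absurd ⟨hle, h⟩ hjm
          · rfl
        have hstep : loopB qs (qs.length) (f + 1) memo (((i : Nat) : Int) :: rest)
            = loopB qs (qs.length) f memo
              (((i + 1 : Nat) : Int) :: ((i : Nat) : Int) :: rest) := by
          have e1 : (if ((i + 1 : Nat) : Int) ≤ (qs.length : Int) - 1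
                ∧ (PySem.Dict.get? memo ((i + 1 : Nat) : Int)).isNone = true
              then [((i + 1 : Nat) : Int)] else ([] : List Int)) = [((i + 1 : Nat) : Int)] :=
            if_pos ⟨hipleI, by rw [hd1none]; rfl⟩
          have e2 : (if ((jOf qs i : Nat) : Int) ≤ (qs.length : Int) - 1
                ∧ (PySem.Dict.get? memo ((jOf qs i : Nat) : Int)).isNone = true
              then [((jOf qs i : Nat) : Int)] else ([] : List Int)) = ([] : List Int) :=
            if_neg (by rintro ⟨hle, hno⟩; rw [Option.isNone_iff_eq_none] at hno; exact hjm ⟨hle, hno⟩)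
          rw [loopB_cons, if_neg (show ¬((PySem.Dict.get? memo ((i : Nat) : Int)).isSome = true) by simp [hnone])]
          simp only [hj, hcast1]
          rw [e1, e2]
          have hne : ([((i + 1 : Nat) : Int)] ++ ([] : List Int)) ≠ [] := by simp
          rw [if_neg hne]
          rfl
        obtain ⟨c2, memo1, hc2le, heq1, hInv1, hmono1, hipsome1, hnew1, -, hnonecl1⟩ :=
          IH f (by omega) memo (i + 1) (((i : Nat) : Int) :: rest) hInv hiplt (by omega)
        obtain ⟨hc24, hU1lt⟩ := hnonecl1 hd1none
        have hU1le := U_mono qs.length memo memo1 hmono1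
        have hinone1 : PySem.Dict.get? memo1 ((i : Nat) : Int) = none := by
          cases h1 : PySem.Dict.get? memo1 ((i : Nat) : Int) with
          | none => rfl
          | some v =>
            rcases hnew1 _ (by rw [h1]; rfl) with hs | ⟨t, ht, hge, -⟩
            · rw [hnone] at hs; simp at hs
            · have : i = t := by exact_mod_cast ht
              omega
        have hUipos := U_pos qs.length memo1 i hi hinone1
        have hjsome1' : ((jOf qs i : Nat) : Int) ≤ (qs.length : Int) - 1 →
            (PySem.Dict.get? memo1 ((jOf qs i : Nat) : Int)).isSome :=
          fun hle => mono_isSome hmono1 (hd2m hle)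
        have hf1 : 1 ≤ f - c2 := by omega
        obtain ⟨f2, hf2⟩ : ∃ f2, f - c2 = f2 + 1 := ⟨f - c2 - 1, by omega⟩
        have hfin : loopB qs (qs.length) (f - c2) memo1 (((i : Nat) : Int) :: rest)
            = loopB qs (qs.length) f2
              (PySem.Dict.insert memo1 ((i : Nat) : Int) (bestFrom qs (qs.length - i))) rest := by
          rw [hf2]
          exact loopB_finalize qs f2 memo1 i rest hR hInv1 hi1 hinone1 hipsome1 hjsome1'
        have hU2 := U_insert qs.length memo1 i (bestFrom qs (qs.length - i)) hi hinone1
        refine ⟨c2 + 2, _, by omega, ?_, InvB_insert qs memo1 i hInv1 hi, ?_, ?_, ?_,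
          fun h => by rw [hnone] at h; simp at h, fun _ => by omega⟩
        · rw [hstep, heq1, hfin]
          have harith : f + 1 - (c2 + 2) = f2 := by omega
          rw [harith]
        · intro k v hkv
          have h1 := hmono1 k v hkv
          rw [PySem.Dict.get?_insert]
          split
          · rename_i he; rw [he, hinone1] at h1; cases h1
          · exact h1
        · rw [PySem.Dict.get?_insert_self]; rfl
        · intro k hk
          rw [PySem.Dict.get?_insert] at hk
          split at hk
          · rename_i he; exact Or.inr ⟨i, he, le_refl i, hi⟩
          · rcases hnew1 k hk with hs | ⟨t, ht, hge, hlt⟩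
            · exact Or.inl hs
            · exact Or.inr ⟨t, ht, by omega, hlt⟩

-- ---- the A-side: the dp fill computes bestFrom ----

theorem getD_set (l : List Int) (a k : Nat) (v : Int) (ha : a < l.length) :
    (l.set a v).getD k 0 = if k = a then v else l.getD k 0 := by
  by_cases h : k = a
  · subst h
    simp [List.getD_eq_getElem?_getD, ha]
  · rw [if_neg h]
    simp [List.getD_eq_getElem?_getD, Ne.symm h]


theorem stepA_sem (qs : List (List Int)) (dp : List Int) (m : Nat) (hR : Rows qs)
    (hm : m < qs.length - 1)
    (hdp : ∀ k : Nat, m + 1 ≤ k → k < qs.length → dp.getD k 0 = bestFrom qs (qs.length - k)) :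
    (if ((m : Nat) : Int) + PySem.List.pyGetD (PySem.List.pyGetD qs ((m : Nat) : Int) []) 1 0 + 1
        ≤ (qs.length : Int) - 1 then
      PySem.List.pySetD dp ((m : Nat) : Int)
        (max (PySem.List.pyGetD (PySem.List.pyGetD qs ((m : Nat) : Int) []) 0 0
                + PySem.List.pyGetD dp
                    (((m : Nat) : Int) + PySem.List.pyGetD (PySem.List.pyGetD qs ((m : Nat) : Int) []) 1 0 + 1) 0)
             (PySem.List.pyGetD dp (((m : Nat) : Int) + 1) 0))
    else
      PySem.List.pySetD dp ((m : Nat) : Int)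
        (max (PySem.List.pyGetD (PySem.List.pyGetD qs ((m : Nat) : Int) []) 0 0)
             (PySem.List.pyGetD dp (((m : Nat) : Int) + 1) 0)))
      = dp.set m (bestFrom qs (qs.length - m)) := by
  obtain ⟨hrlen, hb⟩ := hR m hm
  have hjc : ((m : Nat) : Int) + PySem.List.pyGetD (PySem.List.pyGetD qs ((m : Nat) : Int) []) 1 0 + 1
      = ((jOf qs m : Nat) : Int) := by
    rw [pyB]; unfold jOf; push_cast [Int.toNat_of_nonneg hb]; ring
  have hcast1 : ((m : Nat) : Int) + 1 = ((m + 1 : Nat) : Int) := by push_cast; ring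
  simp only [hjc, hcast1]
  simp only [PySem.List.pyGetD_natCast, PySem.List.pySetD_natCast, PySem.List.pyGetD_ofNat']
  rw [bestFrom_interior qs m hm]
  have hguard : (((m : Nat) : Int) + bOf qs m + 1 ≤ (qs.length : Int) - 1)
      ↔ (((jOf qs m : Nat) : Int) ≤ (qs.length : Int) - 1) := by
    unfold jOf; push_cast [Int.toNat_of_nonneg hb]; omega
  by_cases hg : ((jOf qs m : Nat) : Int) ≤ (qs.length : Int) - 1
  · rw [if_pos hg, if_pos (hguard.mpr hg)]
    have hjlt : jOf qs m < qs.length := by omega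
    rw [hdp (jOf qs m) (by unfold jOf; omega) hjlt, hdp (m + 1) (by omega) (by omega)]
  · rw [if_neg hg, if_neg (fun h => hg (hguard.mp h))]
    rw [hdp (m + 1) (by omega) (by omega)]

theorem A_inv (qs : List (List Int)) (hR : Rows qs) :
    ∀ m : Nat, m ≤ qs.length - 1 → ∀ dp : List Int, dp.length = qs.length →
    (∀ k : Nat, m ≤ k → k < qs.length → dp.getD k 0 = bestFrom qs (qs.length - k)) →
    ∀ k : Nat, k < qs.length →
      ((PySem.List.pyRange ((m : Int) - 1) (-1) (-1)).foldl (fun dp i =>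
        if i + PySem.List.pyGetD (PySem.List.pyGetD qs i []) 1 0 + 1 ≤ (qs.length : Int) - 1 then
          PySem.List.pySetD dp i
            (max (PySem.List.pyGetD (PySem.List.pyGetD qs i []) 0 0
                    + PySem.List.pyGetD dp (i + PySem.List.pyGetD (PySem.List.pyGetD qs i []) 1 0 + 1) 0)
                 (PySem.List.pyGetD dp (i + 1) 0))
        else
          PySem.List.pySetD dp i
            (max (PySem.List.pyGetD (PySem.List.pyGetD qs i []) 0 0)
                 (PySem.List.pyGetD dp (i + 1) 0))) dp).getD k 0 = bestFrom qs (qs.length - k) := by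
  intro m
  induction m with
  | zero =>
    intro _ dp _ hdp k hk
    rw [PySem.List.pyRange_neg_one_eq_nil (by omega)]
    simp only [List.foldl_nil]
    exact hdp k (Nat.zero_le k) hk
  | succ m ih =>
    intro hm dp hlen hdp k hk
    have hm1 : m < qs.length - 1 := by omega
    have hcast : ((m + 1 : Nat) : Int) - 1 = ((m : Nat) : Int) := by push_cast; ring
    rw [hcast, PySem.List.pyRange_neg_one_cons (by omega)]
    simp only [List.foldl_cons]
    rw [stepA_sem qs dp m hR hm1 (fun k2 h1 h2 => hdp k2 (by omega) h2)]
    refine ih (by omega) (dp.set m (bestFrom qs (qs.length - m))) (by simp [hlen]) ?_ k hk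
    intro k2 h1 h2
    rw [getD_set dp m k2 _ (by omega)]
    by_cases he : k2 = m
    · subst he; rw [if_pos rfl]
    · rw [if_neg he]; exact hdp k2 (by omega) h2

-- ===== VERDICT (by name: the statement is the Claim_ definition above) =====
theorem mostPoints_spec : Claim_equal_mostPoints := by
  intro qs hdom hpre
  obtain ⟨hne, hrows, hlast⟩ := hpre
  have hn : 1 ≤ qs.length := by
    cases qs with
    | nil => exact absurd rfl hne
    | cons a l => simp
  have hR : Rows qs := fun t ht => hrows t (List.mem_range.mpr ht)
  have hb1 : bestFrom qs 1 = (qs.getD (qs.length - 1) []).getD 0 0 := by simp [bestFrom]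
  have hcastn1 : (qs.length : Int) - 1 = ((qs.length - 1 : Nat) : Int) := by omega
  have hv1 : PySem.List.pyGetD (PySem.List.pyGetD qs ((qs.length : Int) - 1) []) 0 0
      = bestFrom qs 1 := by
    rw [hcastn1, pyP, hb1]
  show mostPoints qs = mostPoints_alt qs
  -- ---- the A side computes bestFrom qs qs.length ----
  have hAeq : mostPoints qs = bestFrom qs qs.length := by
    simp only [mostPoints]
    have hinit : PySem.List.pySetD (List.replicate qs.length (0 : Int)) ((qs.length : Int) - 1)
        (PySem.List.pyGetD (PySem.List.pyGetD qs ((qs.length : Int) - 1) []) 0 0)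
        = (List.replicate qs.length (0 : Int)).set (qs.length - 1) (bestFrom qs 1) := by
      rw [hv1, hcastn1, PySem.List.pySetD_natCast]
    rw [hinit]
    have hrange : (qs.length : Int) - 2 = ((qs.length - 1 : Nat) : Int) - 1 := by omega
    rw [hrange]
    have hres := A_inv qs hR (qs.length - 1) (le_refl _)
      ((List.replicate qs.length (0 : Int)).set (qs.length - 1) (bestFrom qs 1))
      (by simp) ?_ 0 (by omega)
    · rw [PySem.List.pyGetD_ofNat']
      rw [hres, Nat.sub_zero]
    · intro k h1 h2
      have hke : k = qs.length - 1 := by omega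
      subst hke
      rw [getD_set _ _ _ _ (by simp; omega), if_pos rfl]
      have h1e : qs.length - (qs.length - 1) = 1 := by omega
      rw [h1e]
  -- ---- the B side computes bestFrom qs qs.length ----
  have hInv0 : InvB qs (PySem.Dict.insert PySem.Dict.empty ((qs.length - 1 : Nat) : Int)
      (bestFrom qs 1)) := by
    constructor
    · rw [hcastn1, PySem.Dict.get?_insert_self]; rfl
    · intro k v hkv
      rw [PySem.Dict.get?_insert] at hkv
      split at hkv
      · rename_i he
        refine ⟨qs.length - 1, he, by omega, ?_⟩
        have h1e : qs.length - (qs.length - 1) = 1 := by omega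
        rw [h1e]
        exact (Option.some_inj.mp hkv).symm
      · rw [PySem.Dict.get?_empty] at hkv; cases hkv
  obtain ⟨c, memoF, hcle, heqF, hInvF, -, hsomeF, -, -, -⟩ :=
    solveB qs hR (5 * qs.length + 5)
      (PySem.Dict.insert PySem.Dict.empty ((qs.length - 1 : Nat) : Int) (bestFrom qs 1)) 0 []
      hInv0 (by omega)
      (by
        have h := U_le qs.length
          (PySem.Dict.insert PySem.Dict.empty ((qs.length - 1 : Nat) : Int) (bestFrom qs 1))
        omega)
  obtain ⟨v0, hv0⟩ := Option.isSome_iff_exists.mp hsomeF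
  obtain ⟨t0, ht0, -, ht0val⟩ := hInvF.2 _ _ hv0
  have ht00 : t0 = 0 := by exact_mod_cast ht0.symm
  subst ht00
  have hBeq : mostPoints_alt qs = bestFrom qs qs.length := by
    simp only [mostPoints_alt]
    have hm0 : PySem.Dict.insert PySem.Dict.empty ((qs.length : Int) - 1)
        (PySem.List.pyGetD (PySem.List.pyGetD qs ((qs.length : Int) - 1) []) 0 0)
        = PySem.Dict.insert PySem.Dict.empty ((qs.length - 1 : Nat) : Int) (bestFrom qs 1) := by
      rw [hv1, hcastn1]
    rw [hm0]
    rw [show (0 : Int) = ((0 : Nat) : Int) from rfl]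
    rw [heqF, loopB_nil]
    rw [PySem.Dict.getD_eq_get?_getD, hv0]
    rw [ht0val]
    simp
  rw [hAeq, hBeq]
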